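-- pv_equiv track=rewrite | github.com/ybx810/Dermatosis_Classification | scripts/search_label_merge.py | is_partition_valid
-- ===== SOURCE A (Python) =====
-- def is_partition_valid(
--     partition: tuple[tuple[str, ...], ...],
--     must_stay_single: set[str],
--     forbidden_pairs: set[tuple[str, str]],
-- ) -> bool:
--     for group in partition:
--         group_set = set(group)
--         if len(group_set) > 1 and any(label in must_stay_single for label in group_set):
--             return False
--
--         for first, second in forbidden_pairs:
--             if first in group_set and second in group_set:
--                 return False
--     return True
-- ===== SOURCE B (Python) =====
-- def is_partition_valid(
--     partition: tuple[tuple[str, ...], ...],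
--     must_stay_single: set[str],
--     forbidden_pairs: set[tuple[str, str]],
-- ) -> bool:
--     # Index pass: label -> set of group ids containing it; multi = ids of groups
--     # with more than one distinct label; then each constraint is checked once
--     # against the index instead of once per group.
--     groups_of = {}
--     multi = set()
--     for gid, group in enumerate(partition):
--         distinct = set(group)
--         if len(distinct) > 1:
--             multi.add(gid)
--         for label in distinct:
--             groups_of.setdefault(label, set()).add(gid)
--     for label in must_stay_single:
--         if not multi.isdisjoint(groups_of.get(label, ())):
--             return False
--     for first, second in forbidden_pairs:
--         if not groups_of.get(first, set()).isdisjoint(groups_of.get(second, ())):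
--             return False
--     return True
-- ===== Notes on version B (the rewrite author's own statement) =====
-- stated objective: alternative
-- what changed: Instead of re-scanning the whole forbidden_pairs set for every group, B makes one indexing pass building a label-to-group-ids dict plus the set of multi-label groups, then checks each single-label constraint and each forbidden pair once against that index.
import Mathlib
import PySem

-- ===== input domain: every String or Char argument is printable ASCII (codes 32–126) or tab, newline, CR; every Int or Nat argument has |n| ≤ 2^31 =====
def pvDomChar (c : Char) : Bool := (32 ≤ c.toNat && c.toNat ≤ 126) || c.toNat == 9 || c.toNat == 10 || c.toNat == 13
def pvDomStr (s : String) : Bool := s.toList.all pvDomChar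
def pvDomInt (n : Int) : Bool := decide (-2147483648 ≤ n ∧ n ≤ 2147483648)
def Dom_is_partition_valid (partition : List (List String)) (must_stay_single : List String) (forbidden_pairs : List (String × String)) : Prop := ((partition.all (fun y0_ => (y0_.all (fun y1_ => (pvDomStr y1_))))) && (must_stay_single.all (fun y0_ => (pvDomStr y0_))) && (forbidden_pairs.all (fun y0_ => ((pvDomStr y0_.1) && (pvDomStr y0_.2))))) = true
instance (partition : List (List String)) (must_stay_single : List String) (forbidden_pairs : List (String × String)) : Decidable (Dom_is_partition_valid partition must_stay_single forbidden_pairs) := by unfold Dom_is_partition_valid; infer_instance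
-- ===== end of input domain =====

-- B replaces A's per-group scan over all forbidden pairs by a one-pass label→group-ids index,
-- then checks each single-label and forbidden-pair constraint once against that index (objective: alternative).

-- ===== PORT A =====
-- A's outer 'for group in partition' loop with its early 'return False's
def pvA_loop (must_stay_single : List String) (forbidden_pairs : List (String × String)) : List (List String) → Bool
  | [] => true
  | group :: rest =>
    let group_set : PySem.Set String := PySem.Set.ofList group
    if decide (1 < group_set.length) && group_set.any (fun label => must_stay_single.contains label) then false
    else if forbidden_pairs.any (fun p => group_set.contains p.1 && group_set.contains p.2) then false
    else pvA_loop must_stay_single forbidden_pairs rest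

def is_partition_valid (partition : List (List String)) (must_stay_single : List String) (forbidden_pairs : List (String × String)) : Bool :=
  pvA_loop must_stay_single forbidden_pairs partition

-- ===== PORT B =====
-- one iteration of B's indexing loop 'for gid, group in enumerate(partition)'
-- (groups_of.setdefault(label, set()).add(gid) mutates in place; here: re-insert the grown set)
def pvB_step (st : PySem.Dict String (PySem.Set Int) × PySem.Set Int) (ig : Int × List String) :
    PySem.Dict String (PySem.Set Int) × PySem.Set Int :=
  let distinct : PySem.Set String := PySem.Set.ofList ig.2
  let multi := if 1 < distinct.length then PySem.Set.add st.2 ig.1 else st.2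
  let d := distinct.foldl (fun d label => d.insert label (PySem.Set.add (d.getD label PySem.Set.empty) ig.1)) st.1
  (d, multi)

def is_partition_valid_alt (partition : List (List String)) (must_stay_single : List String) (forbidden_pairs : List (String × String)) : Bool :=
  let st := (PySem.List.enumerate partition).foldl pvB_step (PySem.Dict.empty, PySem.Set.empty)
  let groups_of := st.1
  let multi := st.2
  if must_stay_single.any (fun label => !(PySem.Set.isdisjoint multi (groups_of.getD label PySem.Set.empty))) then false
  else if forbidden_pairs.any (fun p => !(PySem.Set.isdisjoint (groups_of.getD p.1 PySem.Set.empty) (groups_of.getD p.2 PySem.Set.empty))) then false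
  else true

-- ===== PRECONDITION & SPEC =====
def Spec_is_partition_valid (partition : List (List String)) (must_stay_single : List String) (forbidden_pairs : List (String × String)) (out : Bool) : Prop := out = is_partition_valid_alt partition must_stay_single forbidden_pairs
instance (partition : List (List String)) (must_stay_single : List String) (forbidden_pairs : List (String × String)) (out : Bool) : Decidable (Spec_is_partition_valid partition must_stay_single forbidden_pairs out) := by unfold Spec_is_partition_valid; infer_instance

-- ===== CLAIM (what is proved, stated in full; the proofs are below) =====
def Claim_equal_is_partition_valid : Prop := ∀ (partition : List (List String)) (must_stay_single : List String) (forbidden_pairs : List (String × String)), Dom_is_partition_valid partition must_stay_single forbidden_pairs → Spec_is_partition_valid partition must_stay_single forbidden_pairs (is_partition_valid partition must_stay_single forbidden_pairs)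

-- ===== LEMMAS AND PROOFS =====

-- shared "some constraint is violated" proposition
def pvViol (partition : List (List String)) (must_stay_single : List String) (forbidden_pairs : List (String × String)) : Prop :=
  (∃ g ∈ partition, 1 < (PySem.Set.ofList g).length ∧ ∃ lab ∈ g, lab ∈ must_stay_single) ∨
  (∃ g ∈ partition, ∃ p ∈ forbidden_pairs, p.1 ∈ g ∧ p.2 ∈ g)

theorem pvA_false_iff (must : List String) (forb : List (String × String)) (part : List (List String)) :
    pvA_loop must forb part = false ↔ pvViol part must forb := by
  induction part with
  | nil => simp [pvA_loop, pvViol]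
  | cons g rest ih =>
    simp only [pvA_loop]
    split_ifs with h1 h2
    · simp only [Bool.and_eq_true, decide_eq_true_eq, List.any_eq_true] at h1
      obtain ⟨hlen, lab, hlab, hm⟩ := h1
      simp only [pvViol]
      constructor
      · intro _
        exact Or.inl ⟨g, List.mem_cons_self .., hlen,
          lab, (PySem.Set.mem_ofList _ _).mp hlab, by simpa using hm⟩
      · intro _; trivial
    · simp only [List.any_eq_true, Bool.and_eq_true] at h2
      obtain ⟨p, hp, h1', h2'⟩ := h2
      simp only [pvViol]
      constructor
      · intro _
        refine Or.inr ⟨g, List.mem_cons_self .., p, hp, ?_, ?_⟩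
        · exact (PySem.Set.mem_ofList _ _).mp (by simpa using h1')
        · exact (PySem.Set.mem_ofList _ _).mp (by simpa using h2')
      · intro _; trivial
    · rw [ih]
      simp only [pvViol, List.mem_cons]
      constructor
      · rintro (⟨g', hg', hrest⟩ | ⟨g', hg', hrest⟩)
        · exact Or.inl ⟨g', Or.inr hg', hrest⟩
        · exact Or.inr ⟨g', Or.inr hg', hrest⟩
      · rintro (⟨g', (rfl | hg'), hrest⟩ | ⟨g', (rfl | hg'), hrest⟩)
        · -- g' = g: contradicts h1
          exfalso; apply h1
          obtain ⟨hlen, lab, hlab, hm⟩ := hrest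
          simp only [Bool.and_eq_true, decide_eq_true_eq, List.any_eq_true]
          exact ⟨hlen, lab, (PySem.Set.mem_ofList _ _).mpr hlab, by simpa using hm⟩
        · exact Or.inl ⟨g', hg', hrest⟩
        · exfalso; apply h2
          obtain ⟨p, hp, hp1, hp2⟩ := hrest
          simp only [List.any_eq_true, Bool.and_eq_true]
          refine ⟨p, hp, ?_, ?_⟩
          · simpa using (PySem.Set.mem_ofList g' _).mpr hp1
          · simpa using (PySem.Set.mem_ofList g' _).mpr hp2
        · exact Or.inr ⟨g', hg', hrest⟩

-- the inner 'for label in distinct' fold: membership in the looked-up group set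
theorem pvB_inner_mem (ds : List String) (gid : Int)
    (d : PySem.Dict String (PySem.Set Int)) (lab : String) (g' : Int) :
    g' ∈ (ds.foldl (fun d label => d.insert label (PySem.Set.add (d.getD label PySem.Set.empty) gid)) d).getD lab PySem.Set.empty
      ↔ g' ∈ d.getD lab PySem.Set.empty ∨ (g' = gid ∧ lab ∈ ds) := by
  induction ds generalizing d with
  | nil => simp
  | cons x ds ih =>
    simp only [List.foldl_cons, ih, PySem.Dict.getD_insert, List.mem_cons]
    by_cases hx : lab = x
    all_goals simp [hx, PySem.Set.mem_add]
    all_goals tauto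

-- the outer indexing fold: dict component
theorem pvB_outer_memD (l : List (Int × List String))
    (st : PySem.Dict String (PySem.Set Int) × PySem.Set Int) (lab : String) (gid : Int) :
    gid ∈ (l.foldl pvB_step st).1.getD lab PySem.Set.empty
      ↔ gid ∈ st.1.getD lab PySem.Set.empty ∨ ∃ p ∈ l, p.1 = gid ∧ lab ∈ p.2 := by
  induction l generalizing st with
  | nil => simp
  | cons ig l ih =>
    simp only [List.foldl_cons, ih, pvB_step, pvB_inner_mem, PySem.Set.mem_ofList, List.mem_cons]
    constructor
    · rintro ((h | ⟨rfl, h⟩) | ⟨p, hp, h1, h2⟩)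
      · exact Or.inl h
      · exact Or.inr ⟨ig, Or.inl rfl, rfl, h⟩
      · exact Or.inr ⟨p, Or.inr hp, h1, h2⟩
    · rintro (h | ⟨p, (rfl | hp), h1, h2⟩)
      · exact Or.inl (Or.inl h)
      · exact Or.inl (Or.inr ⟨h1.symm, h2⟩)
      · exact Or.inr ⟨p, hp, h1, h2⟩

-- the outer indexing fold: multi component
theorem pvB_outer_memM (l : List (Int × List String))
    (st : PySem.Dict String (PySem.Set Int) × PySem.Set Int) (gid : Int) :
    gid ∈ (l.foldl pvB_step st).2
      ↔ gid ∈ st.2 ∨ ∃ p ∈ l, p.1 = gid ∧ 1 < (PySem.Set.ofList p.2).length := by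
  induction l generalizing st with
  | nil => simp
  | cons ig l ih =>
    simp only [List.foldl_cons, ih, List.mem_cons]
    have hstep : (pvB_step st ig).2
        = if 1 < (PySem.Set.ofList ig.2).length then PySem.Set.add st.2 ig.1 else st.2 := rfl
    rw [hstep]
    by_cases hlen : 1 < (PySem.Set.ofList ig.2).length
    · simp only [if_pos hlen, PySem.Set.mem_add]
      constructor
      · rintro ((h | rfl) | ⟨p, hp, h1, h2⟩)
        · exact Or.inl h
        · exact Or.inr ⟨ig, Or.inl rfl, rfl, hlen⟩
        · exact Or.inr ⟨p, Or.inr hp, h1, h2⟩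
      · rintro (h | ⟨p, (rfl | hp), h1, h2⟩)
        · exact Or.inl (Or.inl h)
        · exact Or.inl (Or.inr h1.symm)
        · exact Or.inr ⟨p, hp, h1, h2⟩
    · simp only [if_neg hlen]
      constructor
      · rintro (h | ⟨p, hp, h1, h2⟩)
        · exact Or.inl h
        · exact Or.inr ⟨p, Or.inr hp, h1, h2⟩
      · rintro (h | ⟨p, (rfl | hp), h1, h2⟩)
        · exact Or.inl h
        · exact absurd h2 hlen
        · exact Or.inr ⟨p, hp, h1, h2⟩

-- a group id found twice in enumerate names the same group
theorem pv_exists_gid_iff (part : List (List String)) (Q R : List String → Prop) :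
    (∃ gid : Int, (∃ p ∈ PySem.List.enumerate part 0, p.1 = gid ∧ Q p.2) ∧
        (∃ p ∈ PySem.List.enumerate part 0, p.1 = gid ∧ R p.2))
      ↔ ∃ g ∈ part, Q g ∧ R g := by
  constructor
  · rintro ⟨gid, ⟨p, hp, hp1, hQ⟩, ⟨q, hq, hq1, hR⟩⟩
    rw [PySem.List.mem_enumerate_iff] at hp hq
    obtain ⟨k, hk, rfl⟩ := hp
    obtain ⟨k', hk', rfl⟩ := hq
    simp only [zero_add] at hp1 hq1
    have : k = k' := by
      have : (k : Int) = (k' : Int) := by rw [hp1, hq1]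
      exact_mod_cast this
    subst this
    exact ⟨part[k], List.getElem_mem hk, hQ, hR⟩
  · rintro ⟨g, hg, hQ, hR⟩
    obtain ⟨k, hk, rfl⟩ := List.getElem_of_mem hg
    refine ⟨(k : Int), ⟨((k : Int), part[k]), ?_, rfl, hQ⟩, ⟨((k : Int), part[k]), ?_, rfl, hR⟩⟩
    · rw [PySem.List.mem_enumerate_iff]; exact ⟨k, hk, by simp⟩
    · rw [PySem.List.mem_enumerate_iff]; exact ⟨k, hk, by simp⟩

theorem pv_not_disjoint_iff {s t : PySem.Set Int} :
    (!(PySem.Set.isdisjoint s t)) = true ↔ ∃ x ∈ s, x ∈ t := by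
  rw [Bool.not_eq_true', ← Bool.not_eq_true, PySem.Set.isdisjoint_iff]
  push Not
  simp

theorem pvB_false_iff (part : List (List String)) (must : List String) (forb : List (String × String)) :
    is_partition_valid_alt part must forb = false ↔ pvViol part must forb := by
  simp only [is_partition_valid_alt]
  split_ifs with h1 h2
  · simp only [List.any_eq_true, pv_not_disjoint_iff] at h1
    obtain ⟨lab, hlab, gid, hm, hd⟩ := h1
    rw [pvB_outer_memM] at hm
    rw [pvB_outer_memD] at hd
    simp only [PySem.Dict.getD_empty, PySem.Set.empty, List.not_mem_nil, false_or] at hm hd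
    constructor
    · intro _
      refine Or.inl ?_
      have := (pv_exists_gid_iff part
        (fun g => 1 < (PySem.Set.ofList g).length) (fun g => lab ∈ g)).mp ⟨gid, hm, hd⟩
      obtain ⟨g, hg, hQ, hR⟩ := this
      exact ⟨g, hg, hQ, lab, hR, hlab⟩
    · intro _; trivial
  · simp only [List.any_eq_true, pv_not_disjoint_iff] at h2
    obtain ⟨p, hp, gid, hm, hd⟩ := h2
    rw [pvB_outer_memD] at hm
    rw [pvB_outer_memD] at hd
    simp only [PySem.Dict.getD_empty, PySem.Set.empty, List.not_mem_nil, false_or] at hm hd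
    constructor
    · intro _
      refine Or.inr ?_
      have := (pv_exists_gid_iff part
        (fun g => p.1 ∈ g) (fun g => p.2 ∈ g)).mp ⟨gid, hm, hd⟩
      obtain ⟨g, hg, hQ, hR⟩ := this
      exact ⟨g, hg, p, hp, hQ, hR⟩
    · intro _; trivial
  · constructor
    · intro h; exact absurd h (by simp)
    · rintro (⟨g, hg, hlen, lab, hlabg, hlabm⟩ | ⟨g, hg, p, hp, hp1, hp2⟩)
      · exfalso; apply h1
        simp only [List.any_eq_true, pv_not_disjoint_iff]
        refine ⟨lab, hlabm, ?_⟩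
        have := (pv_exists_gid_iff part
          (fun g => 1 < (PySem.Set.ofList g).length) (fun g => lab ∈ g)).mpr ⟨g, hg, hlen, hlabg⟩
        obtain ⟨gid, hm, hd⟩ := this
        refine ⟨gid, ?_, ?_⟩
        · rw [pvB_outer_memM]; exact Or.inr hm
        · rw [pvB_outer_memD]; exact Or.inr hd
      · exfalso; apply h2
        simp only [List.any_eq_true, pv_not_disjoint_iff]
        refine ⟨p, hp, ?_⟩
        have := (pv_exists_gid_iff part
          (fun g => p.1 ∈ g) (fun g => p.2 ∈ g)).mpr ⟨g, hg, hp1, hp2⟩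
        obtain ⟨gid, hm, hd⟩ := this
        refine ⟨gid, ?_, ?_⟩
        · rw [pvB_outer_memD]; exact Or.inr hm
        · rw [pvB_outer_memD]; exact Or.inr hd

-- ===== VERDICT (by name: the statement is the Claim_ definition above) =====
theorem is_partition_valid_spec : Claim_equal_is_partition_valid := by
  intro part must forb _
  unfold Spec_is_partition_valid
  have hA := pvA_false_iff must forb part
  have hB := pvB_false_iff part must forb
  rcases hb : is_partition_valid_alt part must forb with _ | _
  · exact hA.mpr (hB.mp hb)
  · rcases ha : is_partition_valid part must forb with _ | _
    · exact absurd (hB.mpr (hA.mp ha)) (by simp [hb])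
    · rfl
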